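-- pv_equiv track=rewrite | github.com/pc5401/my_BOJ | 백준/Silver/2841. 외계인의 기타 연주/외계인의 기타 연주.py | solve
-- ===== SOURCE A (Python) =====
-- from collections import defaultdict
--
-- def solve(N, P, notes):
--     stacks = defaultdict(list)
--     moves = 0
--     for s, f in notes:
--         st = stacks[s]
--         while st and st[-1] > f:
--             st.pop()
--             moves += 1
--         if not st or st[-1] < f:
--             st.append(f)
--             moves += 1
--
--     return moves
-- ===== SOURCE B (Python) =====
-- def solve(N, P, notes):
--     stacks = {}
--     moves = 0
--     for s, f in notes:
--         st = stacks.setdefault(s, [])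
--         # binary search: pos = bisect_right(st, f) on the strictly increasing stack
--         lo, hi = 0, len(st)
--         while lo < hi:
--             mid = (lo + hi) // 2
--             if f < st[mid]:
--                 hi = mid
--             else:
--                 lo = mid + 1
--         moves += len(st) - lo
--         del st[lo:]
--         if not st or st[-1] != f:
--             st.append(f)
--             moves += 1
--     return moves
-- ===== Notes on version B (the rewrite author's own statement) =====
-- stated objective: alternative
-- what changed: The per-note while-pop loop over each stack is replaced by a hand-rolled bisect_right binary search on the strictly increasing stack followed by one slice deletion, and the push test becomes 'top != f' on the truncated stack instead of pop-then-'top < f'.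
import Mathlib
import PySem

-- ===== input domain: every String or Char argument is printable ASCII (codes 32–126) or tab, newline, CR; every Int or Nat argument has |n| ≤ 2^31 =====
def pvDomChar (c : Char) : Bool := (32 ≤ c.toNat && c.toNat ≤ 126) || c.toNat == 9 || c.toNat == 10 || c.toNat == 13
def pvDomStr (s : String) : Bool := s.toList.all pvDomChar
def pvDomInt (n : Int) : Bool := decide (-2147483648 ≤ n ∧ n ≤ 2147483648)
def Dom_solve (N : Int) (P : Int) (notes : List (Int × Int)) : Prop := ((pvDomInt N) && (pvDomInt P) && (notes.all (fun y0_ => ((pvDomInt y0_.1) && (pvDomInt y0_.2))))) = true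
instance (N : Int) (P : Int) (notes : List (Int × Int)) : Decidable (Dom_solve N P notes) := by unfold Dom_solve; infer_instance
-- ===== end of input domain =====

-- B replaces A's per-note while-pop with a binary search + truncation on the sorted stack
-- (alternative decomposition, not claimed faster); return value only, neither port mutates inputs.

-- ===== PORT A =====
-- A keeps each stack as a Python list with its top at the END; the port keeps the top at
-- the HEAD (the same list reversed): st[-1] = head, st.pop() = tail, st.append = cons.
-- Same while loop, same branch order, same counts.
def popA (f : Int) : List Int → List Int × Int
  | [] => ([], 0)
  | t :: rest =>
    if f < t then                       -- while st and st[-1] > f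
      let r := popA f rest              --   st.pop()
      (r.1, r.2 + 1)                    --   moves += 1
    else (t :: rest, 0)

def stepA (acc : PySem.Dict Int (List Int) × Int) (note : Int × Int) :
    PySem.Dict Int (List Int) × Int :=
  let st := acc.1.getD note.1 []        -- defaultdict(list): a missing key reads as []
  let r := popA note.2 st
  if r.1.head?.all (fun t => t < note.2) then     -- if not st or st[-1] < f (head = Python's st[-1])
    (acc.1.insert note.1 (note.2 :: r.1), acc.2 + r.2 + 1)   -- st.append(f); moves += 1
  else (acc.1.insert note.1 r.1, acc.2 + r.2)

def solve (N : Int) (P : Int) (notes : List (Int × Int)) : Int :=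
  (notes.foldl stepA (PySem.Dict.empty, 0)).2

-- ===== PORT B =====
-- Source B's hand-written bisect_right loop (the stack is kept in Python's ascending order).
def bisectR (a : List Int) (f : Int) (lo hi : Nat) : Nat :=
  if h : lo < hi then
    -- mid = (lo + hi) // 2; st[mid] is always in range in Source B
    if f < a.getD ((lo + hi) / 2) 0 then bisectR a f lo ((lo + hi) / 2)
    else bisectR a f ((lo + hi) / 2 + 1) hi
  else lo
termination_by hi - lo
decreasing_by all_goals omega

def stepB (acc : PySem.Dict Int (List Int) × Int) (note : Int × Int) :
    PySem.Dict Int (List Int) × Int :=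
  let st := acc.1.getD note.1 []        -- stacks.setdefault(s, [])
  let pos := bisectR st note.2 0 st.length
  let moves := acc.2 + ((st.length : Int) - (pos : Int))   -- moves += len(st) - lo
  let st1 := st.take pos                -- del st[lo:]
  if st1.getLast? ≠ some note.2 then    -- if not st or st[-1] != f
    (acc.1.insert note.1 (st1 ++ [note.2]), moves + 1)
  else (acc.1.insert note.1 st1, moves)

def solve_alt (N : Int) (P : Int) (notes : List (Int × Int)) : Int :=
  (notes.foldl stepB (PySem.Dict.empty, 0)).2

-- ===== PRECONDITION & SPEC =====
def Spec_solve (N : Int) (P : Int) (notes : List (Int × Int)) (out : Int) : Prop := out = solve_alt N P notes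
instance (N : Int) (P : Int) (notes : List (Int × Int)) (out : Int) : Decidable (Spec_solve N P notes out) := by unfold Spec_solve; infer_instance

-- ===== CLAIM (what is proved, stated in full; the proofs are below) =====
def Claim_equal_solve : Prop := ∀ (N : Int) (P : Int) (notes : List (Int × Int)), Dom_solve N P notes → Spec_solve N P notes (solve N P notes)

-- ===== LEMMAS AND PROOFS =====

-- coupling invariant: A's stack is B's stack reversed, and B's stack is strictly increasing
def InvAB (a b : PySem.Dict Int (List Int)) : Prop :=
  ∀ s : Int, a.getD s [] = (b.getD s []).reverse ∧ (b.getD s []).Pairwise (· < ·)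

theorem popA_eq (f : Int) (xs : List Int) :
    popA f xs = (xs.dropWhile (fun t => decide (f < t)),
                 ((xs.takeWhile (fun t => decide (f < t))).length : Int)) := by
  induction xs with
  | nil => simp [popA]
  | cons t rest ih =>
    by_cases h : f < t <;> simp [popA, h, ih]

theorem takeWhile_append_all {p : Int → Bool} {xs ys : List Int}
    (h : ∀ x ∈ xs, p x = true) : (xs ++ ys).takeWhile p = xs ++ ys.takeWhile p := by
  induction xs with
  | nil => simp
  | cons a t ih =>
    simp only [List.cons_append, List.takeWhile_cons, h a (List.mem_cons_self ..)]
    simp [ih (fun x hx => h x (by simp [hx]))]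

theorem dropWhile_append_all {p : Int → Bool} {xs ys : List Int}
    (h : ∀ x ∈ xs, p x = true) : (xs ++ ys).dropWhile p = ys.dropWhile p := by
  induction xs with
  | nil => simp
  | cons a t ih =>
    simp only [List.cons_append, List.dropWhile_cons, h a (List.mem_cons_self ..)]
    simp [ih (fun x hx => h x (by simp [hx]))]

theorem takeWhile_nil_of_all {p : Int → Bool} {xs : List Int}
    (h : ∀ x ∈ xs, p x = false) : xs.takeWhile p = [] := by
  cases xs with
  | nil => rfl
  | cons a t => simp [h a (by simp)]

theorem dropWhile_self_of_all {p : Int → Bool} {xs : List Int}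
    (h : ∀ x ∈ xs, p x = false) : xs.dropWhile p = xs := by
  cases xs with
  | nil => rfl
  | cons a t => simp [h a (by simp)]

-- every element of the dropped suffix is > f (needs strict sortedness)
theorem dropWhile_gt (f : Int) : ∀ (l : List Int), l.Pairwise (· < ·) →
    ∀ x ∈ l.dropWhile (fun t => decide (t ≤ f)), f < x := by
  intro l
  induction l with
  | nil => intro _ x hx; simp at hx
  | cons a t ih =>
    intro hp x hx
    rw [List.pairwise_cons] at hp
    by_cases ha : a ≤ f
    · rw [List.dropWhile_cons] at hx
      simp only [decide_eq_true_eq, ha, if_pos] at hx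
      exact ih hp.2 x hx
    · rw [List.dropWhile_cons] at hx
      simp only [decide_eq_true_eq, ha, if_false] at hx
      rcases List.mem_cons.mp hx with h | h
      · omega
      · have := hp.1 x h; omega

-- every element of the kept prefix is ≤ f
theorem takeWhile_le (f : Int) (l : List Int) :
    ∀ x ∈ l.takeWhile (fun t => decide (t ≤ f)), x ≤ f := by
  intro x hx
  have := List.mem_takeWhile_imp hx
  simpa using this

-- indices below the takeWhile frontier hold values ≤ f
theorem takeWhile_getElem_le (f : Int) (l : List Int) (i : Nat) (h : i < l.length)
    (hi : i < (l.takeWhile (fun t => decide (t ≤ f))).length) : l[i] ≤ f := by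
  have hpref := l.takeWhile_prefix (fun t => decide (t ≤ f))
  have hmem : (l.takeWhile (fun t => decide (t ≤ f)))[i] ∈
      l.takeWhile (fun t => decide (t ≤ f)) := List.getElem_mem hi
  have hle := List.mem_takeWhile_imp hmem
  rw [hpref.getElem hi] at hle
  simpa using hle

-- indices at or beyond the frontier hold values > f (needs strict sortedness)
theorem dropWhile_getElem_gt (f : Int) (l : List Int) (hs : l.Pairwise (· < ·))
    (i : Nat) (h : i < l.length)
    (hi : (l.takeWhile (fun t => decide (t ≤ f))).length ≤ i) : f < l[i] := by
  have hsplit : l.takeWhile (fun t => decide (t ≤ f)) ++ l.dropWhile (fun t => decide (t ≤ f)) = l :=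
    List.takeWhile_append_dropWhile
  have hlen : i - (l.takeWhile (fun t => decide (t ≤ f))).length <
      (l.dropWhile (fun t => decide (t ≤ f))).length := by
    have := congrArg List.length hsplit
    simp only [List.length_append] at this
    omega
  have heq : l[i] = (l.dropWhile (fun t => decide (t ≤ f)))[i - (l.takeWhile (fun t => decide (t ≤ f))).length]'hlen := by
    rw [List.getElem_of_eq hsplit.symm h]
    exact List.getElem_append_right hi
  rw [heq]
  exact dropWhile_gt f l hs _ (List.getElem_mem hlen)

theorem bisectR_eq_aux (l : List Int) (f : Int) (hs : l.Pairwise (· < ·)) :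
    ∀ n lo hi, hi - lo ≤ n →
      lo ≤ (l.takeWhile (fun t => decide (t ≤ f))).length →
      (l.takeWhile (fun t => decide (t ≤ f))).length ≤ hi →
      hi ≤ l.length →
      bisectR l f lo hi = (l.takeWhile (fun t => decide (t ≤ f))).length := by
  intro n
  induction n with
  | zero =>
    intro lo hi h1 h2 h3 h4
    rw [bisectR, dif_neg (by omega)]
    omega
  | succ n ih =>
    intro lo hi h1 h2 h3 h4
    rw [bisectR]
    by_cases hlt : lo < hi
    · rw [dif_pos hlt]
      by_cases hcmp : f < l.getD ((lo + hi) / 2) 0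
      · rw [if_pos hcmp]
        have hmidlt : (lo + hi) / 2 < l.length := by omega
        have hkmid : (l.takeWhile (fun t => decide (t ≤ f))).length ≤ (lo + hi) / 2 := by
          by_contra hc
          have := takeWhile_getElem_le f l ((lo + hi) / 2) hmidlt (by omega)
          rw [List.getD_eq_getElem l 0 hmidlt] at hcmp
          omega
        exact ih lo _ (by omega) h2 hkmid (by omega)
      · rw [if_neg hcmp]
        have hmidlt : (lo + hi) / 2 < l.length := by omega
        have hkmid : (lo + hi) / 2 < (l.takeWhile (fun t => decide (t ≤ f))).length := by
          by_contra hc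
          have := dropWhile_getElem_gt f l hs ((lo + hi) / 2) hmidlt (by omega)
          rw [List.getD_eq_getElem l 0 hmidlt] at hcmp
          omega
        exact ih _ hi (by omega) (by omega) h3 h4
    · rw [dif_neg hlt]
      omega

theorem bisectR_eq (l : List Int) (f : Int) (hs : l.Pairwise (· < ·)) :
    bisectR l f 0 l.length = (l.takeWhile (fun t => decide (t ≤ f))).length :=
  bisectR_eq_aux l f hs l.length 0 l.length (by omega) (by omega)
    ((l.takeWhile_prefix _).length_le) (le_refl _)

theorem InvAB_insert {a b : PySem.Dict Int (List Int)} (hInv : InvAB a b) (s : Int)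
    (w : List Int) (hsort : w.Pairwise (· < ·)) :
    InvAB (a.insert s w.reverse) (b.insert s w) := by
  intro s'
  rw [PySem.Dict.getD_insert, PySem.Dict.getD_insert]
  split
  · exact ⟨rfl, hsort⟩
  · exact hInv s'

-- in a strictly increasing list every element is ≤ the last one
theorem mem_le_getLast {xs : List Int} {t : Int} {rest : List Int}
    (hpw : xs.Pairwise (· < ·)) (hrev : xs.reverse = t :: rest) :
    ∀ x ∈ xs, x ≤ t := by
  intro x hx
  have hrp : xs.reverse.Pairwise (fun a b => b < a) :=
    (List.pairwise_reverse).2 hpw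
  rw [hrev, List.pairwise_cons] at hrp
  have : x ∈ t :: rest := by rw [← hrev]; simpa using hx
  rcases List.mem_cons.mp this with h | h
  · omega
  · have := hrp.1 x h; omega

theorem step_eq (a b : PySem.Dict Int (List Int)) (m : Int) (note : Int × Int)
    (hInv : InvAB a b) :
    (stepA (a, m) note).2 = (stepB (b, m) note).2 ∧
      InvAB (stepA (a, m) note).1 (stepB (b, m) note).1 := by
  obtain ⟨s, f⟩ := note
  have h1 := (hInv s).1
  have hsort := (hInv s).2
  have hsplit : (b.getD s []).takeWhile (fun t => decide (t ≤ f)) ++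
      (b.getD s []).dropWhile (fun t => decide (t ≤ f)) = b.getD s [] :=
    List.takeWhile_append_dropWhile
  have hdwq : ∀ x ∈ (b.getD s []).dropWhile (fun t => decide (t ≤ f)), f < x :=
    dropWhile_gt f _ hsort
  have htwp : ∀ x ∈ (b.getD s []).takeWhile (fun t => decide (t ≤ f)), x ≤ f :=
    takeWhile_le f _
  have hlen : ((b.getD s []).takeWhile (fun t => decide (t ≤ f))).length +
      ((b.getD s []).dropWhile (fun t => decide (t ≤ f))).length = (b.getD s []).length := by
    have := congrArg List.length hsplit
    simp only [List.length_append] at this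
    exact this
  have htwsort : ((b.getD s []).takeWhile (fun t => decide (t ≤ f))).Pairwise (· < ·) :=
    hsort.sublist (List.takeWhile_sublist _)
  -- A's while-pop on the reversed stack = drop the > f suffix
  have hpop : popA f (b.getD s []).reverse =
      (((b.getD s []).takeWhile (fun t => decide (t ≤ f))).reverse,
       (((b.getD s []).dropWhile (fun t => decide (t ≤ f))).length : Int)) := by
    rw [popA_eq]
    have hrev : (b.getD s []).reverse =
        ((b.getD s []).dropWhile (fun t => decide (t ≤ f))).reverse ++
        ((b.getD s []).takeWhile (fun t => decide (t ≤ f))).reverse := by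
      rw [← List.reverse_append, hsplit]
    have hall : ∀ x ∈ ((b.getD s []).dropWhile (fun t => decide (t ≤ f))).reverse,
        (fun t => decide (f < t)) x = true := by
      intro x hx
      simpa using hdwq x (by simpa using hx)
    have hnone : ∀ x ∈ ((b.getD s []).takeWhile (fun t => decide (t ≤ f))).reverse,
        (fun t => decide (f < t)) x = false := by
      intro x hx
      have := htwp x (by simpa using hx)
      simpa using by omega
    rw [hrev, dropWhile_append_all hall, dropWhile_self_of_all hnone,
      takeWhile_append_all hall, takeWhile_nil_of_all hnone]
    simp
  -- B's bisect/truncate computes the same prefix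
  have hpos : bisectR (b.getD s []) f 0 (b.getD s []).length =
      ((b.getD s []).takeWhile (fun t => decide (t ≤ f))).length := bisectR_eq _ f hsort
  have htake : (b.getD s []).take (((b.getD s []).takeWhile (fun t => decide (t ≤ f))).length) =
      (b.getD s []).takeWhile (fun t => decide (t ≤ f)) :=
    ((List.prefix_iff_eq_take).1 ((b.getD s []).takeWhile_prefix _)).symm
  simp only [stepA, stepB, h1, hpop, hpos, htake, List.head?_reverse]
  rcases hgl : ((b.getD s []).takeWhile (fun t => decide (t ≤ f))).getLast? with _ | t
  · -- kept prefix empty: both push f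
    have htwnil : (b.getD s []).takeWhile (fun t => decide (t ≤ f)) = [] :=
      (List.getLast?_eq_none_iff).1 hgl
    have h0 : ((b.getD s []).takeWhile (fun t => decide (t ≤ f))).length = 0 := by
      rw [htwnil]; rfl
    rw [if_pos (by simp [Option.all]), if_pos (by simp)]
    refine ⟨by simp only []; omega, ?_⟩
    simp only []
    rw [htwnil]
    have hv : (f :: ([] : List Int).reverse) = (([] : List Int) ++ [f]).reverse := by simp
    rw [List.reverse_nil] at hv ⊢
    rw [show (f :: ([] : List Int)) = (([] : List Int) ++ [f]).reverse by simp]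
    exact InvAB_insert hInv s _ (by simp)
  · -- kept prefix ends in t (so t ≤ f, and t is its maximum)
    have htmem : t ∈ (b.getD s []).takeWhile (fun t => decide (t ≤ f)) :=
      List.mem_of_getLast? hgl
    have htf : t ≤ f := htwp t htmem
    obtain ⟨rest', hrevc⟩ :
        ∃ r, ((b.getD s []).takeWhile (fun t => decide (t ≤ f))).reverse = t :: r := by
      have hh : ((b.getD s []).takeWhile (fun t => decide (t ≤ f))).reverse.head? = some t := by
        rw [List.head?_reverse, hgl]
      rcases hc : ((b.getD s []).takeWhile (fun t => decide (t ≤ f))).reverse with _ | ⟨x, r⟩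
      · rw [hc] at hh; simp at hh
      · rw [hc] at hh
        simp only [List.head?_cons, Option.some.injEq] at hh
        exact ⟨r, by rw [hh]⟩
    have hmax : ∀ x ∈ (b.getD s []).takeWhile (fun t => decide (t ≤ f)), x ≤ t :=
      mem_le_getLast htwsort hrevc
    by_cases hbf : t < f
    · -- A pushes (st[-1] < f); B pushes (st[-1] != f)
      rw [if_pos (by simp [Option.all, hbf]), if_pos (by simp only [ne_eq, Option.some.injEq]; omega)]
      refine ⟨by simp only []; omega, ?_⟩
      simp only []
      rw [show (f :: ((b.getD s []).takeWhile (fun t => decide (t ≤ f))).reverse) =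
          ((b.getD s []).takeWhile (fun t => decide (t ≤ f)) ++ [f]).reverse by simp]
      refine InvAB_insert hInv s _ ?_
      rw [List.pairwise_append]
      refine ⟨htwsort, by simp, ?_⟩
      intro x hx y hy
      have := hmax x hx
      simp only [List.mem_singleton] at hy
      omega
    · -- t = f: neither pushes
      have htef : t = f := by omega
      rw [if_neg (by simp [Option.all, hbf]), if_neg (by simp [htef])]
      refine ⟨by simp only []; omega, ?_⟩
      simp only []
      exact InvAB_insert hInv s _ htwsort

theorem fold_eq : ∀ (notes : List (Int × Int)) (a b : PySem.Dict Int (List Int)) (m : Int),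
    InvAB a b → (notes.foldl stepA (a, m)).2 = (notes.foldl stepB (b, m)).2 := by
  intro notes
  induction notes with
  | nil => intro a b m _; rfl
  | cons n ns ih =>
    intro a b m hInv
    have h := step_eq a b m n hInv
    simp only [List.foldl_cons]
    calc (ns.foldl stepA (stepA (a, m) n)).2
        = (ns.foldl stepA ((stepA (a, m) n).1, (stepA (a, m) n).2)).2 := by rw [Prod.mk.eta]
      _ = (ns.foldl stepB ((stepB (b, m) n).1, (stepB (b, m) n).2)).2 := by
            rw [h.1]; exact ih _ _ _ h.2
      _ = (ns.foldl stepB (stepB (b, m) n)).2 := by rw [Prod.mk.eta]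

-- ===== VERDICT (by name: the statement is the Claim_ definition above) =====
theorem solve_spec : Claim_equal_solve := by
  intro N P notes _
  unfold Spec_solve solve solve_alt
  exact fold_eq notes _ _ 0 (fun s => by simp [PySem.Dict.getD_empty])
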